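-- pv_equiv track=rewrite | github.com/RomarioSantos-Oficial/SectorFlow-Setups | core/llm_advisor.py | _compact_assistant_text
-- ===== SOURCE A (Python) =====
-- LOCAL_MAX_ASSISTANT_CHARS = 1200
--
-- def _compact_assistant_text(text: str) -> str:
--     """Reduz texto salvo no histórico para evitar inflar contexto local."""
--     raw = (text or "").strip()
--     if not raw:
--         return ""
--
--     cleaned = raw
--     markers = (
--         "thinking process:",
--         "reasoning:",
--         "chain of thought:",
--     )
--     low = cleaned.lower()
--     for marker in markers:
--         pos = low.find(marker)
--         if pos >= 0:
--             cleaned = cleaned[:pos].strip()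
--             low = cleaned.lower()
--
--     if len(cleaned) > LOCAL_MAX_ASSISTANT_CHARS:
--         cleaned = cleaned[:LOCAL_MAX_ASSISTANT_CHARS].rstrip() + "..."
--     return cleaned
-- ===== SOURCE B (Python) =====
-- LOCAL_MAX_ASSISTANT_CHARS = 1200
--
-- def _compact_assistant_text(text: str) -> str:
--     cleaned = (text or "").strip()
--     low = cleaned.lower()
--     positions = [p for p in (low.find(m) for m in
--                  ("thinking process:", "reasoning:", "chain of thought:"))
--                  if p >= 0]
--     if positions:
--         cleaned = cleaned[:min(positions)].strip()
--     if len(cleaned) > LOCAL_MAX_ASSISTANT_CHARS: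
--         cleaned = cleaned[:LOCAL_MAX_ASSISTANT_CHARS].rstrip() + "..."
--     return cleaned
-- ===== Notes on version B (the rewrite author's own statement) =====
-- stated objective: simpler
-- what changed: A repeatedly cuts, re-lowercases and re-scans the shrinking text once per marker; B lowercases the stripped text once, collects each marker's find position in a single comprehension, and performs one cut at the minimum position.
import Mathlib
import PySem

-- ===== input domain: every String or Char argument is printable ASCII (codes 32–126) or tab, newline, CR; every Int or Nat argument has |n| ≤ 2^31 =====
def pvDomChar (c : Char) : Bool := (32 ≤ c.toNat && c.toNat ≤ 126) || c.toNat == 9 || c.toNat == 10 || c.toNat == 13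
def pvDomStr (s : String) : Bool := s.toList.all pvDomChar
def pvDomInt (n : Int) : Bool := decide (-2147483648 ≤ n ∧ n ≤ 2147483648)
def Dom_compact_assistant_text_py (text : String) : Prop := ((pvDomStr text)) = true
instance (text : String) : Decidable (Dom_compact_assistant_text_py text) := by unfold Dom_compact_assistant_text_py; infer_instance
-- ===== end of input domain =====

-- B replaces A's cut-relower-rescan loop by one lowering, three find positions and a single
-- cut at their minimum (objective: simpler one-pass decomposition; same return value).

-- ===== PORT A =====
-- loop body: for marker in markers: pos = low.find(marker); if pos >= 0: cleaned = cleaned[:pos].strip(); low = cleaned.lower()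
-- state = (cleaned, low)
def pvStepA (st : List Char × List Char) (marker : List Char) : List Char × List Char :=
  let pos := PySem.Chars.find st.2 marker
  if 0 ≤ pos then
    let cleaned' := PySem.Chars.strip (PySem.Chars.slice st.1 none (some pos))
    (cleaned', PySem.Chars.lower cleaned')
  else st

def compact_assistant_text_py (text : String) : String :=
  let raw := PySem.Chars.strip text.toList
  if raw = [] then ""
  else
    let st := ["thinking process:".toList, "reasoning:".toList,
               "chain of thought:".toList].foldl pvStepA (raw, PySem.Chars.lower raw)
    let cleaned := st.1
    if 1200 < PySem.Chars.len cleaned then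
      String.ofList (PySem.Chars.rstrip (PySem.Chars.slice cleaned none (some 1200)) ++ "...".toList)
    else String.ofList cleaned

-- ===== PORT B =====
def compact_assistant_text_py_alt (text : String) : String :=
  let cleaned0 := PySem.Chars.strip text.toList
  let low := PySem.Chars.lower cleaned0
  let positions := (["thinking process:".toList, "reasoning:".toList,
                     "chain of thought:".toList].map
      (fun m => PySem.Chars.find low m)).filter (fun p => 0 ≤ p)
  let cleaned := if positions.isEmpty then cleaned0
    else PySem.Chars.strip (PySem.Chars.slice cleaned0 none
           (some (PySem.List.minD positions (fun p => p) 0)))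
  if 1200 < PySem.Chars.len cleaned then
    String.ofList (PySem.Chars.rstrip (PySem.Chars.slice cleaned none (some 1200)) ++ "...".toList)
  else String.ofList cleaned

-- ===== PRECONDITION & SPEC =====
def Spec_compact_assistant_text_py (text : String) (out : String) : Prop := out = compact_assistant_text_py_alt text
instance (text : String) (out : String) : Decidable (Spec_compact_assistant_text_py text out) := by unfold Spec_compact_assistant_text_py; infer_instance

-- ===== CLAIM (what is proved, stated in full; the proofs are below) =====
def Claim_equal_compact_assistant_text_py : Prop := ∀ (text : String), Dom_compact_assistant_text_py text → Spec_compact_assistant_text_py text (compact_assistant_text_py text)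

-- ===== LEMMAS AND PROOFS =====

theorem pv_isspace_lowerChar (c : Char) :
    PySem.Chars.isspace (PySem.Chars.lowerChar c) = PySem.Chars.isspace c := by
  unfold PySem.Chars.lowerChar
  split_ifs with h
  · have h' : 65 ≤ c.toNat ∧ c.toNat ≤ 90 := by
      simp only [PySem.Chars.isupper, Bool.and_eq_true, decide_eq_true_eq] at h
      exact ⟨h.1, h.2⟩
    have hval : Nat.isValidChar (c.toNat + 32) := Or.inl (by omega)
    have hv : (Char.ofNat (c.toNat + 32)).toNat = c.toNat + 32 := by
      simp [Char.ofNat, hval, Char.ofNatAux]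
      omega
    have hA : PySem.Chars.isspace (Char.ofNat (c.toNat + 32)) = false := by
      simp only [PySem.Chars.isspace, hv, Bool.or_eq_false_iff, Bool.and_eq_false_iff,
        decide_eq_false_iff_not]
      omega
    have hB : PySem.Chars.isspace c = false := by
      simp only [PySem.Chars.isspace, Bool.or_eq_false_iff, Bool.and_eq_false_iff,
        decide_eq_false_iff_not]
      omega
    rw [hA, hB]
  · rfl


theorem pv_lstrip_take (s : List Char) (h : PySem.Chars.lstrip s = s) (n : Nat) :
    PySem.Chars.lstrip (s.take n) = s.take n := by
  unfold PySem.Chars.lstrip at *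
  cases s with
  | nil => simp
  | cons a t =>
    have ha : PySem.Chars.isspace a = false := by
      by_contra hb
      simp only [Bool.not_eq_false] at hb
      simp [hb] at h
      have := congrArg List.length h
      simp at this
      have := List.length_dropWhile_le (p := PySem.Chars.isspace) t
      omega
    cases n with
    | zero => simp
    | succ n => simp [ha]

theorem pv_strip_eq_rstrip (x : List Char) (h : PySem.Chars.lstrip x = x) :
    PySem.Chars.strip x = PySem.Chars.rstrip x := by
  unfold PySem.Chars.strip
  rw [h]

theorem pv_lstrip_idem (x : List Char) : PySem.Chars.lstrip (PySem.Chars.lstrip x) = PySem.Chars.lstrip x := by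
  unfold PySem.Chars.lstrip
  induction x with
  | nil => simp
  | cons a t ih =>
    by_cases ha : PySem.Chars.isspace a
    · simpa [ha] using ih
    · simp [ha]

theorem pv_rstrip_eq_take (x : List Char) :
    PySem.Chars.rstrip x = x.take (PySem.Chars.rstrip x).length := by
  refine (List.prefix_iff_eq_take.mp ?_)
  unfold PySem.Chars.rstrip
  rw [← List.reverse_suffix]
  simp [List.dropWhile_suffix]

theorem pv_lstrip_strip (x : List Char) :
    PySem.Chars.lstrip (PySem.Chars.strip x) = PySem.Chars.strip x := by
  unfold PySem.Chars.strip
  rw [pv_rstrip_eq_take (PySem.Chars.lstrip x)]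
  exact pv_lstrip_take _ (pv_lstrip_idem x) _

theorem pv_rstrip_idem (x : List Char) : PySem.Chars.rstrip (PySem.Chars.rstrip x) = PySem.Chars.rstrip x := by
  unfold PySem.Chars.rstrip
  rw [List.reverse_reverse]
  congr 1
  -- dropWhile idempotent
  induction x.reverse with
  | nil => simp
  | cons a t ih =>
    by_cases ha : PySem.Chars.isspace a
    · simpa [ha] using ih
    · simp [ha]

theorem pv_rstrip_strip (x : List Char) :
    PySem.Chars.rstrip (PySem.Chars.strip x) = PySem.Chars.strip x := by
  unfold PySem.Chars.strip
  exact pv_rstrip_idem _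

theorem pv_lt_length_rstrip (x : List Char) (i : Nat) (hi : i < x.length)
    (hns : PySem.Chars.isspace x[i] = false) : i < (PySem.Chars.rstrip x).length := by
  by_contra hle
  push_neg at hle
  have hlen : (PySem.Chars.rstrip x).length = (List.dropWhile PySem.Chars.isspace x.reverse).length := by
    unfold PySem.Chars.rstrip; simp
  have h1 : (List.takeWhile PySem.Chars.isspace x.reverse).length
      + (List.dropWhile PySem.Chars.isspace x.reverse).length = x.length := by
    have h := congrArg List.length (List.takeWhile_append_dropWhile (p := PySem.Chars.isspace) (l := x.reverse))
    simp only [List.length_append, List.length_reverse] at h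
    exact h
  have hj : x.length - 1 - i < (List.takeWhile PySem.Chars.isspace x.reverse).length := by omega
  have hmem : (List.takeWhile PySem.Chars.isspace x.reverse)[x.length - 1 - i]'hj ∈
      List.takeWhile PySem.Chars.isspace x.reverse := List.getElem_mem hj
  have hsp := List.mem_takeWhile_imp hmem
  have hget : (List.takeWhile PySem.Chars.isspace x.reverse)[x.length - 1 - i]'hj = x[i] := by
    rw [(List.takeWhile_prefix _).getElem]
    rw [List.getElem_reverse]
    congr 1
    omega
  rw [hget, hns] at hsp
  exact Bool.false_ne_true hsp

theorem pv_length_rstrip_le (x : List Char) :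
    (PySem.Chars.rstrip x).length ≤ x.length := by
  have h := congrArg List.length (pv_rstrip_eq_take x)
  rw [List.length_take] at h
  omega

theorem pv_infix_of_prefix_drop (l m : List Char) (j : Nat) (h : m <+: l.drop j) : m <:+: l :=
  h.isInfix.trans (List.drop_suffix j l).isInfix

theorem pv_find_le_of_occ (l m : List Char) (j : Nat) (hocc : m <+: l.drop j) :
    0 ≤ PySem.Chars.find l m ∧ (PySem.Chars.find l m).toNat ≤ j := by
  have hnn : 0 ≤ PySem.Chars.find l m :=
    (PySem.Chars.find_nonneg_iff l m).mpr (pv_infix_of_prefix_drop l m j hocc)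
  refine ⟨hnn, ?_⟩
  by_contra hlt
  push_neg at hlt
  exact (PySem.Chars.find_spec hnn).2 j hlt hocc

theorem pv_find_eq_of (l m : List Char) (j : Nat)
    (hocc : m <+: l.drop j) (hmin : ∀ i < j, ¬ m <+: l.drop i) :
    PySem.Chars.find l m = (j : Int) := by
  obtain ⟨hnn, hle⟩ := pv_find_le_of_occ l m j hocc
  have hge : j ≤ (PySem.Chars.find l m).toNat := by
    by_contra h
    push_neg at h
    exact hmin _ h (PySem.Chars.find_spec hnn).1
  omega

theorem pv_find_take (l m : List Char) (r : Nat) :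
    PySem.Chars.find (l.take r) m =
      if 0 ≤ PySem.Chars.find l m ∧ (PySem.Chars.find l m).toNat + m.length ≤ r
      then PySem.Chars.find l m else -1 := by
  split_ifs with hin
  · obtain ⟨hnn, hfit⟩ := hin
    set f := (PySem.Chars.find l m).toNat with hf
    have hspec := PySem.Chars.find_spec hnn
    have hocc : m <+: (l.take r).drop f := by
      rw [List.drop_take]
      exact List.prefix_take_iff.mpr ⟨hspec.1, by omega⟩
    have hmin : ∀ i < f, ¬ m <+: (l.take r).drop i := by
      intro i hi hpre
      rw [List.drop_take] at hpre
      exact hspec.2 i hi (List.prefix_take_iff.mp hpre).1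
    have := pv_find_eq_of (l.take r) m f hocc hmin
    omega
  · rw [PySem.Chars.find_eq_neg_one_iff]
    intro hinf
    obtain ⟨j, hj⟩ := (PySem.Chars.exists_prefix_drop_iff_isIn (s := l.take r) (sub := m)).mpr
      ((PySem.Chars.isIn_iff_infix (s := l.take r) (sub := m)).mpr hinf)
    rw [List.drop_take] at hj
    obtain ⟨hocc, hlen⟩ := List.prefix_take_iff.mp hj
    obtain ⟨hnn, hle⟩ := pv_find_le_of_occ l m j hocc
    by_cases hm0 : m = []
    · subst hm0
      exact hin ⟨by rw [PySem.Chars.find_nil], by rw [PySem.Chars.find_nil]; simp⟩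
    · have hmpos : 0 < m.length := List.length_pos_iff.mpr hm0
      exact hin ⟨hnn, by omega⟩

theorem pv_no_straddle (u v l : List Char)
    (hpair : ∀ t < u.length, 0 < t → ¬ (u.drop t <+: v) ∧ ¬ (v <+: u.drop t))
    (q p : Nat) (hu : u <+: l.drop q) (hv : v <+: l.drop p)
    (h1 : q < p) (h2 : p < q + u.length) : False := by
  set t := p - q with ht
  have hdt : u.drop t <+: l.drop p := by
    obtain ⟨rest, hrest⟩ := hu
    have : l.drop p = (l.drop q).drop t := by rw [List.drop_drop]; congr 1; omega
    rw [this, ← hrest, List.drop_append_of_le_length (by omega)]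
    exact ⟨rest, rfl⟩
  have hor := List.prefix_or_prefix_of_prefix hdt hv
  have hp := hpair t (by omega) (by omega)
  rcases hor with h | h
  · exact hp.1 h
  · exact hp.2 h

-- the cut: what A's cleaned looks like after cutting at position P
theorem pv_cut_eq_take (s : List Char) (P : Nat) :
    PySem.Chars.rstrip (s.take P) = s.take (PySem.Chars.rstrip (s.take P)).length ∧
      (PySem.Chars.rstrip (s.take P)).length ≤ P := by
  have h1 := pv_rstrip_eq_take (s.take P)
  have h2 := pv_length_rstrip_le (s.take P)
  rw [List.length_take] at h2
  have hk : min (PySem.Chars.rstrip (s.take P)).length P = (PySem.Chars.rstrip (s.take P)).length := by omega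
  constructor
  · conv_lhs => rw [h1]
    rw [List.take_take, hk]
  · omega

theorem pv_lower_take (s : List Char) (k : Nat) :
    PySem.Chars.lower (s.take k) = (PySem.Chars.lower s).take k := by
  unfold PySem.Chars.lower
  exact List.map_take

-- one loop iteration of A, on a cut state
theorem pv_step (s : List Char) (hl : PySem.Chars.lstrip s = s)
    (m : List Char) (hm : m ≠ [])
    (hlast : m[m.length - 1]? = some ':')
    (P : Nat) (hP : P ≤ s.length)
    (hguard : 0 ≤ PySem.Chars.find (PySem.Chars.lower s) m →
      (PySem.Chars.find (PySem.Chars.lower s) m).toNat < P →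
      (PySem.Chars.find (PySem.Chars.lower s) m).toNat + m.length ≤ P) :
    pvStepA (PySem.Chars.rstrip (s.take P),
             PySem.Chars.lower (PySem.Chars.rstrip (s.take P))) m =
      if 0 ≤ PySem.Chars.find (PySem.Chars.lower s) m ∧
         (PySem.Chars.find (PySem.Chars.lower s) m).toNat < P
      then (PySem.Chars.rstrip (s.take (PySem.Chars.find (PySem.Chars.lower s) m).toNat),
            PySem.Chars.lower (PySem.Chars.rstrip (s.take (PySem.Chars.find (PySem.Chars.lower s) m).toNat)))
      else (PySem.Chars.rstrip (s.take P),
            PySem.Chars.lower (PySem.Chars.rstrip (s.take P))) := by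
  set l := PySem.Chars.lower s with hldef
  set f := PySem.Chars.find l m with hfdef
  have hlen_l : l.length = s.length := by rw [hldef]; unfold PySem.Chars.lower; simp
  obtain ⟨hc, hclenP⟩ := pv_cut_eq_take s P
  set c := PySem.Chars.rstrip (s.take P) with hcdef
  have hclen : c.length ≤ s.length := by
    have := congrArg List.length hc
    rw [List.length_take] at this
    omega
  have hmpos : 0 < m.length := List.length_pos_iff.mpr hm
  have hlow : PySem.Chars.lower c = l.take c.length := by
    conv_lhs => rw [hc]
    rw [pv_lower_take]
  have hfind : PySem.Chars.find (PySem.Chars.lower c) m =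
      if 0 ≤ f ∧ f.toNat + m.length ≤ c.length then f else -1 := by
    rw [hlow, pv_find_take]
  split_ifs with hcase
  · obtain ⟨hf0, hfP⟩ := hcase
    have hfitP : f.toNat + m.length ≤ P := hguard hf0 hfP
    have hocc : m <+: l.drop f.toNat := (PySem.Chars.find_spec hf0).1
    -- the occurrence's last char is ':' hence survives the rstrip of s.take P
    have hiN : f.toNat + m.length - 1 < s.length := by
      have : f ≤ (l.length : Int) := PySem.Chars.find_le_length l m
      omega
    have hlast_l : l[f.toNat + m.length - 1]? = some ':' := by
      obtain ⟨rest, hrest⟩ := hocc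
      have hdrop : (l.drop f.toNat)[m.length - 1]? = some ':' := by
        rw [← hrest, List.getElem?_append_left (by omega)]
        exact hlast
      rw [List.getElem?_drop] at hdrop
      have hidx : f.toNat + m.length - 1 = f.toNat + (m.length - 1) := by omega
      rw [hidx]
      exact hdrop
    have hns : PySem.Chars.isspace (s[f.toNat + m.length - 1]'hiN) = false := by
      have hmap : l[f.toNat + m.length - 1]? =
          (s[f.toNat + m.length - 1]?).map PySem.Chars.lowerChar := by
        rw [hldef]
        unfold PySem.Chars.lower
        rw [List.getElem?_map]
      rw [hlast_l, List.getElem?_eq_getElem hiN] at hmap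
      have hlc : PySem.Chars.lowerChar (s[f.toNat + m.length - 1]'hiN) = ':' := by
        have := hmap.symm
        simp only [Option.map_some, Option.some_inj] at this
        exact this
      rw [← pv_isspace_lowerChar, hlc]
      decide
    have hfit : f.toNat + m.length ≤ c.length := by
      have hidx : f.toNat + m.length - 1 < (s.take P).length := by
        rw [List.length_take]; omega
      have := pv_lt_length_rstrip (s.take P) (f.toNat + m.length - 1) hidx (by
        rw [List.getElem_take]; exact hns)
      rw [← hcdef] at this
      omega
    -- now the find in the cut text returns f
    have hfind' : PySem.Chars.find (PySem.Chars.lower c) m = f := by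
      rw [hfind, if_pos ⟨hf0, hfit⟩]
    show pvStepA (c, PySem.Chars.lower c) m = _
    unfold pvStepA
    rw [hfind', if_pos hf0]
    have hslice : PySem.Chars.slice c none (some f) = c.take f.toNat := by
      simp only [PySem.Chars.slice_eq_listSlice]
      exact PySem.List.slice_to c hf0
    have hctake : c.take f.toNat = s.take f.toNat := by
      rw [hc, List.take_take]
      congr 1
      omega
    rw [hslice, hctake, pv_strip_eq_rstrip _ (pv_lstrip_take s hl _)]
  · -- not found, or found at or past P: the find in the cut text is -1
    have hnot : ¬ (0 ≤ f ∧ f.toNat + m.length ≤ c.length) := by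
      rintro ⟨hf0, hfit⟩
      exact hcase ⟨hf0, by omega⟩
    have hfind' : PySem.Chars.find (PySem.Chars.lower c) m = -1 := by
      rw [hfind, if_neg hnot]
    show pvStepA (c, PySem.Chars.lower c) m = _
    unfold pvStepA
    rw [hfind']
    norm_num

theorem pv_pair21 : ∀ t < ("reasoning:".toList).length, 0 < t →
    ¬ (("reasoning:".toList).drop t <+: "thinking process:".toList) ∧
    ¬ ("thinking process:".toList <+: ("reasoning:".toList).drop t) := by decide
theorem pv_pair31 : ∀ t < ("chain of thought:".toList).length, 0 < t →
    ¬ (("chain of thought:".toList).drop t <+: "thinking process:".toList) ∧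
    ¬ ("thinking process:".toList <+: ("chain of thought:".toList).drop t) := by decide
theorem pv_pair32 : ∀ t < ("chain of thought:".toList).length, 0 < t →
    ¬ (("chain of thought:".toList).drop t <+: "reasoning:".toList) ∧
    ¬ ("reasoning:".toList <+: ("chain of thought:".toList).drop t) := by decide

theorem pv_occ_bound (l m : List Char) (_hm : m ≠ [])
    (hf : 0 ≤ PySem.Chars.find l m) :
    (PySem.Chars.find l m).toNat + m.length ≤ l.length := by
  have hocc := (PySem.Chars.find_spec hf).1
  have hlen := hocc.length_le
  rw [List.length_drop] at hlen
  have hfl := PySem.Chars.find_le_length l m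
  omega

theorem pv_guard (l u v : List Char)
    (hpair : ∀ t < u.length, 0 < t → ¬ (u.drop t <+: v) ∧ ¬ (v <+: u.drop t))
    (p : Nat) (hv : v <+: l.drop p) :
    0 ≤ PySem.Chars.find l u → (PySem.Chars.find l u).toNat < p →
    (PySem.Chars.find l u).toNat + u.length ≤ p := by
  intro hf hlt
  by_contra hcon
  push_neg at hcon
  exact pv_no_straddle u v l hpair (PySem.Chars.find l u).toNat p
    (PySem.Chars.find_spec hf).1 hv hlt hcon

theorem pv_rhs (s : List Char) (hl : PySem.Chars.lstrip s = s)
    (V : Int) (hV : 0 ≤ V) (Q : Nat) (hQ : Q = V.toNat) :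
    PySem.Chars.rstrip (s.take Q) = PySem.Chars.strip (PySem.Chars.slice s none (some V)) := by
  simp only [PySem.Chars.slice_eq_listSlice]
  rw [PySem.List.slice_to s hV, pv_strip_eq_rstrip _ (pv_lstrip_take s hl _), hQ]

theorem pv_minD1 (a : Int) : PySem.List.minD [a] (fun p => p) 0 = a := by
  simp only [PySem.List.minD, PySem.List.min?, List.foldl_cons, List.foldl_nil, Option.getD_some]
theorem pv_minD2 (a b : Int) : PySem.List.minD [a, b] (fun p => p) 0 = if b < a then b else a := by
  simp only [PySem.List.minD, PySem.List.min?, List.foldl_cons, List.foldl_nil]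
  split_ifs <;> simp_all
theorem pv_minD3 (a b c : Int) : PySem.List.minD [a, b, c] (fun p => p) 0 =
    (if c < (if b < a then b else a) then c else (if b < a then b else a)) := by
  simp only [PySem.List.minD, PySem.List.min?, List.foldl_cons, List.foldl_nil]
  split_ifs <;> simp_all <;> (try (split_ifs <;> simp_all)) <;> omega

theorem pv_core (s : List Char) (hl : PySem.Chars.lstrip s = s)
    (hr : PySem.Chars.rstrip s = s) :
    (["thinking process:".toList, "reasoning:".toList, "chain of thought:".toList].foldl
        pvStepA (s, PySem.Chars.lower s)).1 =
    (if ((["thinking process:".toList, "reasoning:".toList, "chain of thought:".toList].map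
          (fun m => PySem.Chars.find (PySem.Chars.lower s) m)).filter (fun p => 0 ≤ p)).isEmpty
     then s
     else PySem.Chars.strip (PySem.Chars.slice s none (some (PySem.List.minD
       ((["thinking process:".toList, "reasoning:".toList, "chain of thought:".toList].map
          (fun m => PySem.Chars.find (PySem.Chars.lower s) m)).filter (fun p => 0 ≤ p))
       (fun p => p) 0)))) := by
  set l := PySem.Chars.lower s with hldef
  have hlen_l : l.length = s.length := by rw [hldef]; unfold PySem.Chars.lower; simp
  set f1 := PySem.Chars.find l "thinking process:".toList with hf1def
  set f2 := PySem.Chars.find l "reasoning:".toList with hf2def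
  set f3 := PySem.Chars.find l "chain of thought:".toList with hf3def
  have hm1len : ("thinking process:".toList).length = 17 := by decide
  have hm2len : ("reasoning:".toList).length = 10 := by decide
  have hm3len : ("chain of thought:".toList).length = 17 := by decide
  have hb1 : 0 ≤ f1 → f1.toNat + 17 ≤ s.length := fun h => by
    have := pv_occ_bound l _ (by decide) h; rw [hm1len] at this; omega
  have hb2 : 0 ≤ f2 → f2.toNat + 10 ≤ s.length := fun h => by
    have := pv_occ_bound l _ (by decide) h; rw [hm2len] at this; omega
  have hb3 : 0 ≤ f3 → f3.toNat + 17 ≤ s.length := fun h => by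
    have := pv_occ_bound l _ (by decide) h; rw [hm3len] at this; omega
  have hocc1 : 0 ≤ f1 → "thinking process:".toList <+: l.drop f1.toNat :=
    fun h => (PySem.Chars.find_spec h).1
  have hocc2 : 0 ≤ f2 → "reasoning:".toList <+: l.drop f2.toNat :=
    fun h => (PySem.Chars.find_spec h).1
  have hs0 : (s, PySem.Chars.lower s) =
      (PySem.Chars.rstrip (s.take s.length),
       PySem.Chars.lower (PySem.Chars.rstrip (s.take s.length))) := by
    rw [List.take_length, hr]
  simp only [List.foldl_cons, List.foldl_nil, List.map_cons, List.map_nil,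
    List.filter_cons, List.filter_nil, decide_eq_true_eq]
  rw [hs0]
  rw [pv_step s hl _ (by decide) (by decide) s.length le_rfl
    (by simp only [← hldef, ← hf1def]; intro h _; rw [hm1len]; exact hb1 h)]
  simp only [← hldef, ← hf1def, ← hf2def, ← hf3def]
  by_cases hf1 : 0 ≤ f1
  · rw [if_pos ⟨hf1, by have := hb1 hf1; omega⟩]
    rw [pv_step s hl _ (by decide) (by decide) f1.toNat (by have := hb1 hf1; omega)
      (by simp only [← hldef, ← hf2def]; exact pv_guard l _ _ pv_pair21 f1.toNat (hocc1 hf1))]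
    simp only [← hldef, ← hf1def, ← hf2def, ← hf3def]
    by_cases hf2 : 0 ≤ f2
    · by_cases hlt21 : f2.toNat < f1.toNat
      · rw [if_pos ⟨hf2, hlt21⟩]
        rw [pv_step s hl _ (by decide) (by decide) f2.toNat (by have := hb2 hf2; omega)
          (by simp only [← hldef, ← hf3def]; exact pv_guard l _ _ pv_pair32 f2.toNat (hocc2 hf2))]
        simp only [← hldef, ← hf1def, ← hf2def, ← hf3def]
        by_cases hf3 : 0 ≤ f3
        · simp only [if_pos hf1, if_pos hf2, if_pos hf3]
          rw [pv_minD3]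
          split_ifs <;>
            first
              | exact pv_rhs s hl _ (by omega) _ (by omega)
              | simp_all
        · simp only [if_pos hf1, if_pos hf2, if_neg hf3]
          rw [pv_minD2]
          split_ifs <;>
            first
              | exact pv_rhs s hl _ (by omega) _ (by omega)
              | simp_all
      · rw [if_neg (by rintro ⟨_, h⟩; exact hlt21 h)]
        rw [pv_step s hl _ (by decide) (by decide) f1.toNat (by have := hb1 hf1; omega)
          (by simp only [← hldef, ← hf3def]; exact pv_guard l _ _ pv_pair31 f1.toNat (hocc1 hf1))]
        simp only [← hldef, ← hf1def, ← hf2def, ← hf3def]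
        by_cases hf3 : 0 ≤ f3
        · simp only [if_pos hf1, if_pos hf2, if_pos hf3]
          rw [pv_minD3]
          split_ifs <;>
            first
              | exact pv_rhs s hl _ (by omega) _ (by omega)
              | simp_all
        · simp only [if_pos hf1, if_pos hf2, if_neg hf3]
          rw [pv_minD2]
          split_ifs <;>
            first
              | exact pv_rhs s hl _ (by omega) _ (by omega)
              | simp_all
    · rw [if_neg (by rintro ⟨h, _⟩; exact hf2 h)]
      rw [pv_step s hl _ (by decide) (by decide) f1.toNat (by have := hb1 hf1; omega)
        (by simp only [← hldef, ← hf3def]; exact pv_guard l _ _ pv_pair31 f1.toNat (hocc1 hf1))]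
      simp only [← hldef, ← hf1def, ← hf2def, ← hf3def]
      by_cases hf3 : 0 ≤ f3
      · simp only [if_pos hf1, if_neg hf2, if_pos hf3]
        rw [pv_minD2]
        split_ifs <;>
          first
            | exact pv_rhs s hl _ (by omega) _ (by omega)
            | simp_all
      · simp only [if_pos hf1, if_neg hf2, if_neg hf3]
        rw [pv_minD1]
        split_ifs <;>
          first
            | exact pv_rhs s hl _ (by omega) _ (by omega)
            | simp_all
  · rw [if_neg (by rintro ⟨h, _⟩; exact hf1 h)]
    rw [pv_step s hl _ (by decide) (by decide) s.length le_rfl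
      (by simp only [← hldef, ← hf2def]; intro h _; rw [hm2len]; exact hb2 h)]
    simp only [← hldef, ← hf1def, ← hf2def, ← hf3def]
    by_cases hf2 : 0 ≤ f2
    · rw [if_pos ⟨hf2, by have := hb2 hf2; omega⟩]
      rw [pv_step s hl _ (by decide) (by decide) f2.toNat (by have := hb2 hf2; omega)
        (by simp only [← hldef, ← hf3def]; exact pv_guard l _ _ pv_pair32 f2.toNat (hocc2 hf2))]
      simp only [← hldef, ← hf1def, ← hf2def, ← hf3def]
      by_cases hf3 : 0 ≤ f3
      · simp only [if_neg hf1, if_pos hf2, if_pos hf3]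
        rw [pv_minD2]
        split_ifs <;>
          first
            | exact pv_rhs s hl _ (by omega) _ (by omega)
            | simp_all
      · simp only [if_neg hf1, if_pos hf2, if_neg hf3]
        rw [pv_minD1]
        split_ifs <;>
          first
            | exact pv_rhs s hl _ (by omega) _ (by omega)
            | simp_all
    · rw [if_neg (by rintro ⟨h, _⟩; exact hf2 h)]
      rw [pv_step s hl _ (by decide) (by decide) s.length le_rfl
        (by simp only [← hldef, ← hf3def]; intro h _; rw [hm3len]; exact hb3 h)]
      simp only [← hldef, ← hf1def, ← hf2def, ← hf3def]
      by_cases hf3 : 0 ≤ f3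
      · rw [if_pos ⟨hf3, by have := hb3 hf3; omega⟩]
        simp only [if_neg hf1, if_neg hf2, if_pos hf3]
        rw [pv_minD1]
        split_ifs <;>
          first
            | exact pv_rhs s hl _ (by omega) _ (by omega)
            | simp_all
      · rw [if_neg (by rintro ⟨h, _⟩; exact hf3 h)]
        simp only [if_neg hf1, if_neg hf2, if_neg hf3]
        split_ifs with hemp
        · show PySem.Chars.rstrip (s.take s.length) = s
          rw [List.take_length, hr]
        · simp at hemp

-- ===== VERDICT (by name: the statement is the Claim_ definition above) =====
theorem compact_assistant_text_py_spec : Claim_equal_compact_assistant_text_py := by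
  intro text _
  unfold Spec_compact_assistant_text_py
  simp only [compact_assistant_text_py, compact_assistant_text_py_alt]
  set s := PySem.Chars.strip text.toList with hsdef
  have hl : PySem.Chars.lstrip s = s := by rw [hsdef]; exact pv_lstrip_strip text.toList
  have hr : PySem.Chars.rstrip s = s := by rw [hsdef]; exact pv_rstrip_strip text.toList
  by_cases hs : s = []
  · rw [if_pos hs, hs]
    decide
  · rw [if_neg hs]
    rw [pv_core s hl hr]
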